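-- pv_equiv track=rewrite | github.com/yungommi/algorithm | programmers/level0/20230908/A강조하기.py | solution
-- ===== SOURCE A (Python) =====
-- def solution(myString):
--     answer = ''
--     for x in myString:
--         if x == 'a' or x == 'A':
--             answer += "A"
--         else:
--             answer += x.lower()
--     return answer
-- ===== SOURCE B (Python) =====
-- def solution(myString):
--     return myString.lower().replace('a', 'A')
-- ===== Notes on version B (the rewrite author's own statement) =====
-- stated objective: idiomatic
-- what changed: Replaces the per-character branching loop with string concatenation by two whole-string operations: lowercase the entire string, then promote the target letter back to uppercase with one str.replace call.
import Mathlib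
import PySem

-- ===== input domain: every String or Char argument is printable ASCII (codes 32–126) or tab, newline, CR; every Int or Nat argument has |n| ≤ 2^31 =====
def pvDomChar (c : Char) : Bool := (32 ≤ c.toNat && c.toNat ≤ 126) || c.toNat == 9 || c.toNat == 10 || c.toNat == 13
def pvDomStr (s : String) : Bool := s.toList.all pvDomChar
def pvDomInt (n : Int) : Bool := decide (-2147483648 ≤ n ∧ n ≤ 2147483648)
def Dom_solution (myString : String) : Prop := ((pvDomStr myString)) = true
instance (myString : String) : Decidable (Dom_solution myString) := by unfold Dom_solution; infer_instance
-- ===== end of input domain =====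

-- B replaces A's per-character branching loop with two whole-string operations (lower, then replace 'a'→'A'); idiomatic rewrite, same result.


-- ===== PORT A =====
-- answer = ''; for x in myString: answer += 'A' if x in ('a','A') else x.lower(); return answer
def solution (myString : String) : String :=
  myString.toList.foldl
    (fun answer x =>
      if x == 'a' || x == 'A' then answer ++ "A"
      else answer ++ PySem.Str.lower (String.ofList [x])) ""

-- ===== PORT B =====
-- return myString.lower().replace('a', 'A')
def solution_alt (myString : String) : String :=
  PySem.Str.replace (PySem.Str.lower myString) "a" "A"

-- ===== PRECONDITION & SPEC =====
def Spec_solution (myString : String) (out : String) : Prop := out = solution_alt myString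
instance (myString : String) (out : String) : Decidable (Spec_solution myString out) := by unfold Spec_solution; infer_instance

-- ===== CLAIM (what is proved, stated in full; the proofs are below) =====
def Claim_equal_solution : Prop := ∀ (myString : String), Dom_solution myString → Spec_solution myString (solution myString)

-- ===== LEMMAS AND PROOFS =====

-- single-character replacement: replace.go with old = ['a'] is a map
theorem replace_go_single (fuel : Nat) :
    ∀ (l acc : List Char), l.length ≤ fuel →
      PySem.Chars.replace.go ['a'] ['A'] fuel l acc =
        acc.reverse ++ l.map (fun c => if c = 'a' then 'A' else c) := by
  induction fuel with
  | zero =>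
    intro l acc h
    have : l = [] := List.length_eq_zero_iff.mp (Nat.le_zero.mp h)
    subst this
    simp [PySem.Chars.replace.go]
  | succ n ih =>
    intro l acc h
    cases l with
    | nil => simp [PySem.Chars.replace.go]
    | cons c t =>
      by_cases hc : c = 'a'
      · subst hc
        have hp : List.isPrefixOf ['a'] ('a' :: t) = true := by
          simp [List.isPrefixOf]
        simp only [PySem.Chars.replace.go, hp, if_pos]
        rw [show List.drop (['a'].length) ('a' :: t) = t from rfl,
            show (['A'].reverse ++ acc : List Char) = 'A' :: acc from rfl,
            ih t ('A' :: acc) (by simpa using Nat.le_of_succ_le_succ h)]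
        simp
      · have hp : List.isPrefixOf ['a'] (c :: t) = false := by
          simp only [List.isPrefixOf, Bool.and_true]
          exact beq_eq_false_iff_ne.mpr (Ne.symm hc)
        simp only [PySem.Chars.replace.go, hp, Bool.false_eq_true, if_false]
        rw [ih t (c :: acc) (by simpa using Nat.le_of_succ_le_succ h)]
        simp [hc]

theorem replace_single (l : List Char) :
    PySem.Chars.replace l ['a'] ['A'] = l.map (fun c => if c = 'a' then 'A' else c) := by
  simp only [PySem.Chars.replace, List.isEmpty_cons, Bool.false_eq_true, if_false]
  simpa using replace_go_single l.length l [] le_rfl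

-- lowerChar c = 'a' exactly for c ∈ {'a','A'}
theorem lowerChar_key (c : Char) :
    (if PySem.Chars.lowerChar c = 'a' then 'A' else PySem.Chars.lowerChar c) =
      (if (c == 'a' || c == 'A') = true then 'A' else PySem.Chars.lowerChar c) := by
  by_cases ha : c = 'a'
  · subst ha; decide
  · by_cases hA : c = 'A'
    · subst hA; decide
    · have hne : PySem.Chars.lowerChar c ≠ 'a' := by
        unfold PySem.Chars.lowerChar PySem.Chars.isupper
        split
        · rename_i hup
          simp only [decide_eq_true_eq, Bool.and_eq_true] at hup
          intro hcontra
          have hv : (c.toNat + 32).isValidChar := by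
            have : c.toNat ≤ 90 := hup.2
            left; omega
          have : (Char.ofNat (c.toNat + 32)).toNat = c.toNat + 32 := by
            rw [Char.toNat_ofNat, if_pos hv]
          have h97 : c.toNat + 32 = 97 := by
            have h2 := this
            rw [hcontra] at h2
            have ha97 : ('a' : Char).toNat = 97 := by decide
            omega
          have hc65 : c.toNat = 65 := by omega
          exact hA (by rw [← Char.ofNat_toNat c, hc65])
        · exact ha
      simp [ha, hA, hne]

-- A's loop, characterised on the list side
theorem solutionA_toList (cs : List Char) (s : String) :
    (cs.foldl
      (fun answer x =>
        if x == 'a' || x == 'A' then answer ++ "A"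
        else answer ++ PySem.Str.lower (String.ofList [x])) s).toList =
      s.toList ++ cs.map (fun c => if (c == 'a' || c == 'A') = true then 'A' else PySem.Chars.lowerChar c) := by
  induction cs generalizing s with
  | nil => simp
  | cons c t ih =>
    simp only [List.foldl_cons, List.map_cons]
    by_cases h : (c == 'a' || c == 'A') = true
    · rw [if_pos h, ih]
      simp [h]
    · rw [if_neg h, ih]
      simp only [h, Bool.false_eq_true, if_false]
      have : (s ++ PySem.Str.lower (String.ofList [c])).toList = s.toList ++ [PySem.Chars.lowerChar c] := by
        simp [PySem.Chars.lower]
      rw [this, List.append_assoc]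
      simp

-- ===== VERDICT (by name: the statement is the Claim_ definition above) =====
theorem solution_spec : Claim_equal_solution := by
  intro myString _
  unfold Spec_solution
  apply String.ext
  simp only [solution, solution_alt]
  rw [solutionA_toList, PySem.Str.toList_replace,
      show ("a" : String).toList = ['a'] from rfl,
      show ("A" : String).toList = ['A'] from rfl,
      replace_single, PySem.Str.toList_lower]
  simp only [PySem.Chars.lower, List.map_map, Function.comp_def]
  rw [← List.map_congr_left (fun c _ => lowerChar_key c)]
  simp
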